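-- pv_equiv track=rewrite | github.com/Oneloutre/projet-transverse | ballbounce/CreateDiamondGrid.py | createDiamondGridMatrix
-- ===== SOURCE A (Python) =====
-- def createDiamondGridMatrix(long):
--     gridMatrix = list()
--     pas = 0
--     for i in range(long):
--         gridMatrix.append([1]*long)
--         for j in range(0, long//2 - pas, 1):
--             gridMatrix[i][-j-1] = 0
--             gridMatrix[i][j] = 0
--         if i < (long//2):
--             pas += 1
--         else:
--             pas -= 1
--     return gridMatrix
-- ===== SOURCE B (Python) =====
-- def createDiamondGridMatrix(long):
--     z = long // 2
--     rows = []
--     for i in range(long):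
--         t = abs(i - z)
--         rows.append([0] * t + [1] * (long - 2 * t) + [0] * t)
--     return rows
-- ===== Notes on version B (the rewrite author's own statement) =====
-- stated objective: simpler
-- what changed: Replaces the append-all-ones-then-overwrite-the-ends pass driven by the running 'pas' counter with a closed-form per-row construction: row i is [0]*t + [1]*(long-2t) + [0]*t with t = abs(i - long//2); no accumulator, no per-cell overwrites.
import Mathlib
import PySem

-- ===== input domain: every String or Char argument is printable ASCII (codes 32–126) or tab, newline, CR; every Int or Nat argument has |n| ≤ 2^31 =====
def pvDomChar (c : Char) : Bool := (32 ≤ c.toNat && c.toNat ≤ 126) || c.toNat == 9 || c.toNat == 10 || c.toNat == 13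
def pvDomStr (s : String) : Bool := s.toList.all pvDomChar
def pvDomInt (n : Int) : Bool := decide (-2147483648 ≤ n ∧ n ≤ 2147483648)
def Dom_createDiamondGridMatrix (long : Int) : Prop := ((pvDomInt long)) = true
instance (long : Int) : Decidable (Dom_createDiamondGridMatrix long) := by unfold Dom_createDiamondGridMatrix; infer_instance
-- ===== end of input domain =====

-- B replaces A's fill-with-ones-then-zero-the-ends pass (driven by the running 'pas'
-- counter) with a closed-form per-row construction [0]*t + [1]*(long-2t) + [0]*t,
-- t = |i - long//2|; objective: simpler (no running counter, no per-cell overwrites).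

-- ===== PORT A =====
-- A: append [1]*long, zero out the first/last (long//2 - pas) cells, update pas.
def createDiamondGridMatrix (long : Int) : List (List Int) :=
  ((PySem.List.pyRange 0 long 1).foldl
    (fun (st : List (List Int) × Int) i =>
      let row0 := PySem.List.pyRepeat [(1 : Int)] long
      let row := (PySem.List.pyRange 0 (PySem.Int.floordiv long 2 - st.2) 1).foldl
        (fun r j => PySem.List.pySetD (PySem.List.pySetD r (-j - 1) 0) j 0) row0
      (st.1 ++ [row], if i < PySem.Int.floordiv long 2 then st.2 + 1 else st.2 - 1))
    ([], 0)).1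

-- ===== PORT B =====
def createDiamondGridMatrix_alt (long : Int) : List (List Int) :=
  (PySem.List.pyRange 0 long 1).map (fun i =>
    List.replicate (|i - PySem.Int.floordiv long 2|).toNat (0 : Int) ++
    List.replicate (long - 2 * |i - PySem.Int.floordiv long 2|).toNat 1 ++
    List.replicate (|i - PySem.Int.floordiv long 2|).toNat 0)

-- ===== PRECONDITION & SPEC =====
def Spec_createDiamondGridMatrix (long : Int) (out : List (List Int)) : Prop := out = createDiamondGridMatrix_alt long
instance (long : Int) (out : List (List Int)) : Decidable (Spec_createDiamondGridMatrix long out) := by unfold Spec_createDiamondGridMatrix; infer_instance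

-- ===== CLAIM (what is proved, stated in full; the proofs are below) =====
def Claim_equal_createDiamondGridMatrix : Prop := ∀ (long : Int), Dom_createDiamondGridMatrix long → Spec_createDiamondGridMatrix long (createDiamondGridMatrix long)

-- ===== LEMMAS AND PROOFS =====

-- setting a negative Python index -i-1 is setting position len-1-i
theorem pySetD_neg_succ (xs : List Int) (i v : Int) (h0 : 0 ≤ i) (h : i < xs.length) :
    PySem.List.pySetD xs (-i - 1) v = xs.set (xs.length - 1 - i.toNat) v := by
  unfold PySem.List.pySetD PySem.List.pySet? PySem.List.pyIdx?
  split_ifs with h1 h2 <;> simp_all <;> try omega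
  congr 1
  omega

-- A's inner loop, Nat-indexed bound: length and per-entry characterisation
theorem rowFold_nat (L : Int) (k : Nat) (h2m : 2 * (k : Int) ≤ L) :
    ((PySem.List.pyRange 0 (k : Int) 1).foldl
        (fun r j => PySem.List.pySetD (PySem.List.pySetD r (-j - 1) 0) j 0)
        (PySem.List.pyRepeat [(1 : Int)] L)).length = L.toNat ∧
    ∀ (idx : Nat) (hidx : idx < ((PySem.List.pyRange 0 (k : Int) 1).foldl
        (fun r j => PySem.List.pySetD (PySem.List.pySetD r (-j - 1) 0) j 0)
        (PySem.List.pyRepeat [(1 : Int)] L)).length),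
      ((PySem.List.pyRange 0 (k : Int) 1).foldl
        (fun r j => PySem.List.pySetD (PySem.List.pySetD r (-j - 1) 0) j 0)
        (PySem.List.pyRepeat [(1 : Int)] L))[idx] =
      (if (idx : Int) < (k : Int) ∨ L - (k : Int) ≤ (idx : Int) then 0 else 1) := by
  induction k with
  | zero =>
    rw [show ((0 : Nat) : Int) = 0 by rfl, PySem.List.pyRange_one_eq_nil le_rfl]
    simp only [List.foldl_nil, PySem.List.pyRepeat_singleton]
    refine ⟨by simp, ?_⟩
    intro idx hidx
    simp only [List.length_replicate] at hidx
    rw [List.getElem_replicate, if_neg (by omega)]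
  | succ k ih =>
    have hk : 2 * (k : Int) ≤ L := by push_cast at h2m ⊢; omega
    obtain ⟨ihl, ihe⟩ := ih hk
    rw [show (((k + 1 : Nat)) : Int) = (k : Int) + 1 by push_cast; ring,
        PySem.List.pyRange_one_succ_right (by omega), List.foldl_append]
    simp only [List.foldl_cons, List.foldl_nil]
    have heq : PySem.List.pySetD (PySem.List.pySetD ((PySem.List.pyRange 0 (k : Int) 1).foldl
        (fun r j => PySem.List.pySetD (PySem.List.pySetD r (-j - 1) 0) j 0)
        (PySem.List.pyRepeat [(1 : Int)] L)) (-(k : Int) - 1) 0) ((k : Int)) 0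
        = (((PySem.List.pyRange 0 (k : Int) 1).foldl
        (fun r j => PySem.List.pySetD (PySem.List.pySetD r (-j - 1) 0) j 0)
        (PySem.List.pyRepeat [(1 : Int)] L)).set (L.toNat - 1 - k) 0).set k 0 := by
      rw [pySetD_neg_succ _ _ _ (by omega) (by rw [ihl]; push_cast at h2m ⊢; omega),
          PySem.List.pySetD_natCast, ihl]
      simp
    simp only [heq]
    constructor
    · rw [List.length_set, List.length_set, ihl]
    · intro idx hidx
      simp only [List.length_set, ihl] at hidx
      rw [List.getElem_set, List.getElem_set]
      by_cases h1 : k = idx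
      · rw [if_pos h1, if_pos (by omega)]
      · rw [if_neg h1]
        by_cases h2 : L.toNat - 1 - k = idx
        · rw [if_pos h2, if_pos (by push_cast at h2m ⊢; omega)]
        · rw [if_neg h2, ihe idx (by rw [ihl]; omega)]
          by_cases h3 : (idx : Int) < (k : Int) ∨ L - (k : Int) ≤ (idx : Int)
          · rw [if_pos h3, if_pos (by omega)]
          · rw [if_neg h3, if_neg (by omega)]

-- A's inner loop on a fresh all-ones row: entry k is 0 iff k < m or L - m ≤ k
theorem rowFold_spec (L m : Int) (hm : 0 ≤ m) (h2m : 2 * m ≤ L) :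
    (PySem.List.pyRange 0 m 1).foldl
        (fun r j => PySem.List.pySetD (PySem.List.pySetD r (-j - 1) 0) j 0)
        (PySem.List.pyRepeat [(1 : Int)] L)
      = List.replicate m.toNat (0 : Int) ++
        List.replicate (L - 2 * m).toNat 1 ++ List.replicate m.toNat 0 := by
  obtain ⟨k, rfl⟩ : ∃ k : Nat, m = (k : Int) := ⟨m.toNat, by omega⟩
  have h := rowFold_nat L k h2m
  apply List.ext_getElem
  · rw [h.1]; simp; omega
  · intro idx h1 h2
    rw [h.2 idx h1]
    have hidx : idx < L.toNat := by rwa [h.1] at h1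
    simp only [List.getElem_append, List.length_append, List.length_replicate, List.getElem_replicate]
    split_ifs <;> omega

-- A's outer loop invariant: after n rows the state is (first n of B's rows, z - |n - z|)
theorem outer_inv (long : Int) (hl : 0 ≤ long) (n : Nat) (hn : (n : Int) ≤ long) :
    (PySem.List.pyRange 0 (n : Int) 1).foldl
      (fun (st : List (List Int) × Int) i =>
        let row0 := PySem.List.pyRepeat [(1 : Int)] long
        let row := (PySem.List.pyRange 0 (PySem.Int.floordiv long 2 - st.2) 1).foldl
          (fun r j => PySem.List.pySetD (PySem.List.pySetD r (-j - 1) 0) j 0) row0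
        (st.1 ++ [row], if i < PySem.Int.floordiv long 2 then st.2 + 1 else st.2 - 1))
      ([], 0)
    = ((PySem.List.pyRange 0 (n : Int) 1).map (fun i =>
        List.replicate (|i - PySem.Int.floordiv long 2|).toNat (0 : Int) ++
        List.replicate (long - 2 * |i - PySem.Int.floordiv long 2|).toNat 1 ++
        List.replicate (|i - PySem.Int.floordiv long 2|).toNat 0),
       PySem.Int.floordiv long 2 - |(n : Int) - PySem.Int.floordiv long 2|) := by
  have hz : PySem.Int.floordiv long 2 = long / 2 := PySem.Int.floordiv_eq_ediv_of_pos (by omega)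
  induction n with
  | zero =>
    rw [PySem.List.pyRange_one_eq_nil (by omega)]
    simp [abs_of_nonneg (by omega : (0 : Int) ≤ long / 2)]
  | succ n ih =>
    have hn' : (n : Int) ≤ long := by push_cast at hn ⊢; omega
    rw [show (((n + 1 : Nat)) : Int) = (n : Int) + 1 by push_cast; ring] at hn ⊢
    rw [PySem.List.pyRange_one_succ_right (by omega), List.foldl_append, List.map_append,
        ih hn']
    simp only [List.foldl_cons, List.foldl_nil, List.map_cons, List.map_nil]
    have hb : PySem.Int.floordiv long 2 - (PySem.Int.floordiv long 2 - |(n : Int) - PySem.Int.floordiv long 2|) = |(n : Int) - PySem.Int.floordiv long 2| := by ring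
    have h2m : 2 * |(n : Int) - PySem.Int.floordiv long 2| ≤ long := by
      rcases le_total ((n : Int)) (long / 2) with hc | hc
      · rw [hz, abs_of_nonpos (by omega)]; omega
      · rw [hz, abs_of_nonneg (by omega)]; omega
    rw [hb, rowFold_spec long _ (abs_nonneg _) h2m]
    refine Prod.ext rfl ?_
    simp only []
    by_cases hc2 : (n : Int) < PySem.Int.floordiv long 2
    · rw [if_pos hc2, abs_of_nonpos (by omega : (n : Int) - PySem.Int.floordiv long 2 ≤ 0),
          abs_of_nonpos (by omega : (n : Int) + 1 - PySem.Int.floordiv long 2 ≤ 0)]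
      ring
    · rw [if_neg hc2, abs_of_nonneg (by omega : (0 : Int) ≤ (n : Int) - PySem.Int.floordiv long 2),
          abs_of_nonneg (by omega : (0 : Int) ≤ (n : Int) + 1 - PySem.Int.floordiv long 2)]
      ring

-- ===== VERDICT (by name: the statement is the Claim_ definition above) =====
theorem createDiamondGridMatrix_spec : Claim_equal_createDiamondGridMatrix := by
  intro long _
  unfold Spec_createDiamondGridMatrix createDiamondGridMatrix createDiamondGridMatrix_alt
  by_cases hl : 0 ≤ long
  · have h := outer_inv long hl long.toNat (by omega)
    rw [show ((long.toNat : Int)) = long by omega] at h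
    rw [h]
  · rw [PySem.List.pyRange_one_eq_nil (by omega)]
    simp
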